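-- pv_equiv track=rewrite | github.com/Amharc-Hash/CodeDS | LAB9_Sort/63010871_Lab9_3.py | drome
-- ===== SOURCE A (Python) =====
-- def drome(lst):
--     is_descending = True
--     is_ascending = True
--     is_unique = True
--     is_same = True
--     unique_lst = []
--     for i in range(len(lst)-1):
--         if lst[i] < lst[i+1]: is_descending = False
--         if lst[i] > lst[i+1]: is_ascending = False
--         if lst[i] in unique_lst: is_unique = False
--         if lst[i] != lst[i+1]:
--             is_same = False
--         unique_lst.append(lst[i])
--     if lst[len(lst)-1] in unique_lst:
--         is_unique = False
--
--     if is_same: return "Repdrome"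
--     elif is_ascending and is_unique: return "Metadrome"
--     elif is_ascending and not is_unique: return "Plaindrome"
--     elif is_descending and is_unique: return "Katadrome"
--     elif is_descending and not is_unique: return "Nialpdrome"
--     else: return "Nondrome"
-- ===== SOURCE B (Python) =====
-- def drome(lst):
--     last = lst[-1]
--     if all(x == last for x in lst):
--         return "Repdrome"
--     is_ascending = lst == sorted(lst)
--     is_descending = lst == sorted(lst, reverse=True)
--     is_unique = len(set(lst)) == len(lst)
--     if is_ascending and is_unique: return "Metadrome"
--     elif is_ascending: return "Plaindrome"
--     elif is_descending and is_unique: return "Katadrome"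
--     elif is_descending: return "Nialpdrome"
--     else: return "Nondrome"
-- ===== Notes on version B (the rewrite author's own statement) =====
-- stated objective: faster
-- what changed: Replaced the single index-driven scan that tracks four flags and an accumulating seen-list (quadratic membership tests) with whole-sequence operations: compare against sorted(lst) / sorted(lst, reverse=True) for the monotone flags, len(set(lst)) for uniqueness, and all-equal-to-last for Repdrome.
import Mathlib
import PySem

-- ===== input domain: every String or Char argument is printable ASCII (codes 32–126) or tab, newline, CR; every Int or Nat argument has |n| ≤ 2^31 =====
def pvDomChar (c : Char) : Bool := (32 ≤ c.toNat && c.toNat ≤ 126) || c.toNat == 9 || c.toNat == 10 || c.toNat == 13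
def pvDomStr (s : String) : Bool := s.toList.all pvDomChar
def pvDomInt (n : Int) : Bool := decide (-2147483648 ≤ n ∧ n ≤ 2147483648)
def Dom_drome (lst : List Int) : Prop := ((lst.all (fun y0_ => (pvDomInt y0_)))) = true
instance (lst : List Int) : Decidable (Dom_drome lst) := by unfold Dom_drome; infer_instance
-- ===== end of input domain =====

-- B replaces A's single flag-tracking scan (with a quadratic seen-list) by whole-sequence
-- operations: compare with the sorted list (both directions), set-size for uniqueness,
-- all-equal-to-last for Repdrome; objective: simpler.

-- ===== PORT A =====
-- state: (is_descending, is_ascending, is_unique, is_same, unique_lst)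
def dromeStep (st : Bool × Bool × Bool × Bool × List Int) (a b : Int) :
    Bool × Bool × Bool × Bool × List Int :=
  let isD := if a < b then false else st.1
  let isA := if a > b then false else st.2.1
  let isU := if st.2.2.2.2.contains a then false else st.2.2.1
  let isS := if a ≠ b then false else st.2.2.2.1
  (isD, isA, isU, isS, st.2.2.2.2 ++ [a])


def drome (lst : List Int) : String :=
  let st := (PySem.List.pyRange 0 ((lst.length : Int) - 1) 1).foldl
    (fun st i => dromeStep st (PySem.List.pyGetD lst i 0) (PySem.List.pyGetD lst (i + 1) 0))
    (true, true, true, true, [])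
  let isU := if st.2.2.2.2.contains (PySem.List.pyGetD lst ((lst.length : Int) - 1) 0)
             then false else st.2.2.1
  if st.2.2.2.1 then "Repdrome"
  else if st.2.1 && isU then "Metadrome"
  else if st.2.1 && !isU then "Plaindrome"
  else if st.1 && isU then "Katadrome"
  else if st.1 && !isU then "Nialpdrome"
  else "Nondrome"

-- ===== PORT B =====
def drome_alt (lst : List Int) : String :=
  let last := PySem.List.pyGetD lst (-1) 0
  if lst.all (fun x => x == last) then "Repdrome"
  else
    let isA := lst == PySem.List.sorted lst (fun x => x) false
    let isD := lst == PySem.List.sorted lst (fun x => x) true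
    let isU := (PySem.Set.ofList lst).length == lst.length
    if isA && isU then "Metadrome"
    else if isA then "Plaindrome"
    else if isD && isU then "Katadrome"
    else if isD then "Nialpdrome"
    else "Nondrome"

-- ===== PRECONDITION & SPEC =====
-- Pre_ excludes only the empty list, on which A raises IndexError at lst[len(lst)-1].
def Pre_drome (lst : List Int) : Prop := lst ≠ []
instance (lst : List Int) : Decidable (Pre_drome lst) := by unfold Pre_drome; infer_instance
def pvWitness_drome : List Int := [1, 2, 2]
def Spec_drome (lst : List Int) (out : String) : Prop := out = drome_alt lst
instance (lst : List Int) (out : String) : Decidable (Spec_drome lst out) := by unfold Spec_drome; infer_instance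

-- ===== CLAIM (what is proved, stated in full; the proofs are below) =====
def Claim_equal_drome : Prop := ∀ (lst : List Int), Dom_drome lst → Pre_drome lst → Spec_drome lst (drome lst)

-- ===== LEMMAS AND PROOFS =====
-- A's loop rewritten as structural recursion over adjacent pairs.
def dromeGo (st : Bool × Bool × Bool × Bool × List Int) : List Int → Bool × Bool × Bool × Bool × List Int
  | x :: y :: rest => dromeGo (dromeStep st x y) (y :: rest)
  | _ => st


lemma foldl_natrange_eq_go : ∀ (lst : List Int) (st : Bool × Bool × Bool × Bool × List Int),
    (List.range (lst.length - 1)).foldl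
      (fun st k => dromeStep st (lst.getD k 0) (lst.getD (k+1) 0)) st
    = dromeGo st lst
  | [], st => rfl
  | [x], st => rfl
  | x :: y :: rest, st => by
    have h := foldl_natrange_eq_go (y :: rest) (dromeStep st x y)
    simp only [List.length_cons, Nat.add_sub_cancel] at h ⊢
    rw [List.range_succ_eq_map]
    simp only [List.foldl_cons, List.foldl_map, List.getD_cons_succ, List.getD_cons_zero]
    exact h

lemma foldl_range_eq_go (lst : List Int) (st : Bool × Bool × Bool × Bool × List Int) :
    (PySem.List.pyRange 0 ((lst.length : Int) - 1) 1).foldl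
      (fun st i => dromeStep st (PySem.List.pyGetD lst i 0) (PySem.List.pyGetD lst (i + 1) 0)) st
    = dromeGo st lst := by
  rw [PySem.List.pyRange_one]
  rw [List.foldl_map]
  have : ((lst.length : Int) - 1 - 0).toNat = lst.length - 1 := by omega
  rw [this]
  rw [← foldl_natrange_eq_go lst st]
  congr 1
  funext st k
  have : (0 : Int) + (k : Int) = ((k : Int)) := by ring
  rw [this]
  have h1 : PySem.List.pyGetD lst (k : Int) 0 = lst.getD k 0 := PySem.List.pyGetD_natCast ..
  have h2 : PySem.List.pyGetD lst ((k : Int) + 1) 0 = lst.getD (k+1) 0 := by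
    have : ((k : Int) + 1) = ((k + 1 : Nat) : Int) := by push_cast; ring
    rw [this]; exact PySem.List.pyGetD_natCast ..
  rw [h1, h2]

lemma dromeGo_eq : ∀ (lst : List Int) (st : Bool × Bool × Bool × Bool × List Int),
    dromeGo st lst =
      (st.1 && decide (List.IsChain (fun a b : Int => b ≤ a) lst),
       st.2.1 && decide (List.IsChain (fun a b : Int => a ≤ b) lst),
       st.2.2.1 && decide lst.dropLast.Nodup && decide (∀ x ∈ lst.dropLast, x ∉ st.2.2.2.2),
       st.2.2.2.1 && decide (List.IsChain (fun a b : Int => a = b) lst),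
       st.2.2.2.2 ++ lst.dropLast)
  | [], st => by simp [dromeGo]
  | [x], st => by simp [dromeGo]
  | x :: y :: rest, st => by
    show dromeGo (dromeStep st x y) (y :: rest) = _
    rw [dromeGo_eq (y :: rest) (dromeStep st x y)]
    simp only [dromeStep, List.dropLast_cons₂, Prod.mk.injEq, List.isChain_cons_cons]
    refine ⟨?_, ?_, ?_, ?_, ?_⟩
    · by_cases h : x < y
      · simp [h, show ¬ (y ≤ x) by omega]
      · simp [h, show (y ≤ x) by omega, Bool.and_assoc]
    · by_cases h : y < x
      · simp [show x > y from h, show ¬ (x ≤ y) by omega]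
      · simp [show ¬ (x > y) from h, show (x ≤ y) by omega, Bool.and_assoc]
    · cases hu : st.2.2.1
      · simp
      · by_cases h : st.2.2.2.2.contains x
        · have hx : x ∈ st.2.2.2.2 := by simpa using h
          simp only [h, if_true, Bool.false_and, hu]
          symm
          rw [Bool.and_eq_false_iff]
          right
          rw [decide_eq_false_iff_not]
          rintro hall
          exact (hall x (by simp)) hx
        · have hx : x ∉ st.2.2.2.2 := by simpa using h
          simp only [h, Bool.false_eq_true, if_false, Bool.true_and]
          rw [← Bool.decide_and, ← Bool.decide_and, decide_eq_decide]
          simp only [List.nodup_cons]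
          constructor
          · rintro ⟨hnd, hall⟩
            refine ⟨⟨fun hm => ?_, hnd⟩, fun z hz => ?_⟩
            · exact absurd (hall x hm) (by simp)
            · rcases List.mem_cons.1 hz with rfl | hz
              · exact hx
              · exact fun hc => (hall z hz) (by simp [hc])
          · rintro ⟨⟨hxm, hnd⟩, hall⟩
            refine ⟨hnd, fun z hz hc => ?_⟩
            rcases List.mem_append.1 hc with hc | hc
            · exact (hall z (by simp [hz])) hc
            · simp at hc; subst hc; exact hxm hz
    · by_cases h : x = y
      · simp [h, Bool.and_assoc]
      · simp [h]
    · simp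

lemma ofList_len_iff : ∀ (xs : List Int), ((PySem.Set.ofList xs).length = xs.length) ↔ xs.Nodup
  | [] => by simp
  | x :: xs => by
    rw [PySem.Set.ofList_cons, List.nodup_cons]
    by_cases hx : x ∈ xs
    · have hx' : x ∈ PySem.Set.ofList xs := (PySem.Set.mem_ofList xs x).2 hx
      have hlt : ((PySem.Set.ofList xs).discard x).length < (PySem.Set.ofList xs).length := by
        apply List.length_filter_lt_length_iff_exists.2
        exact ⟨x, hx', by simp⟩
      have hle := PySem.Set.length_ofList_le (xs := xs)
      simp only [List.length_cons]
      constructor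
      · intro h; omega
      · rintro ⟨hc, -⟩; exact absurd hx hc
    · have hx' : x ∉ PySem.Set.ofList xs := fun hc => hx ((PySem.Set.mem_ofList xs x).1 hc)
      have hd : (PySem.Set.ofList xs).discard x = PySem.Set.ofList xs := by
        apply List.filter_eq_self.2
        intro y hy
        have : y ≠ x := fun hc => hx' (hc ▸ hy)
        simp [this]
      rw [hd]
      simp only [List.length_cons, Nat.add_right_cancel_iff]
      rw [ofList_len_iff xs]
      simp [hx]

lemma asc_iff (lst : List Int) :
    (lst = PySem.List.sorted lst (fun x => x) false) ↔ List.IsChain (fun a b : Int => a ≤ b) lst := by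
  constructor
  · intro h
    have := PySem.List.sorted_pairwise lst (fun x => x)
    rw [← h] at this
    exact this.isChain
  · intro h
    exact (PySem.List.sorted_eq_self_of_pairwise lst (fun x => x) h.pairwise).symm

lemma desc_iff (lst : List Int) :
    (lst = PySem.List.sorted lst (fun x => x) true) ↔ List.IsChain (fun a b : Int => b ≤ a) lst := by
  constructor
  · intro h
    have := PySem.List.sorted_pairwise_rev lst (fun x => x)
    rw [← h] at this
    exact this.isChain
  · intro h
    have : List.Pairwise (fun a b : Int => b ≤ a) lst := by
      have : Trans (fun a b : Int => b ≤ a) (fun a b : Int => b ≤ a) (fun a b : Int => b ≤ a) :=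
        ⟨fun hab hbc => le_trans hbc hab⟩
      exact h.pairwise
    exact (PySem.List.sorted_rev_eq_self_of_pairwise lst (fun x => x) this).symm

lemma same_iff : ∀ (lst : List Int) (h : lst ≠ []),
    (∀ x ∈ lst, x = lst.getLast h) ↔ List.IsChain (fun a b : Int => a = b) lst
  | [x], _ => by simp
  | x :: y :: rest, _ => by
    rw [List.isChain_cons_cons, ← same_iff (y :: rest) (by simp)]
    constructor
    · intro hall
      have hl : (x :: y :: rest).getLast (by simp) = (y :: rest).getLast (by simp) := by
        simp [List.getLast_cons]
      refine ⟨?_, fun z hz => ?_⟩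
      · exact (hall x (by simp)).trans (hall y (by simp)).symm
      · rw [← hl]; exact hall z (by simp [hz])
    · rintro ⟨heq, hall⟩
      intro z hz
      have hl : (x :: y :: rest).getLast (by simp) = (y :: rest).getLast (by simp) := by
        simp [List.getLast_cons]
      rw [hl]
      rcases List.mem_cons.1 hz with rfl | hz
      · exact heq.trans (hall y (by simp))
      · exact hall z hz

lemma drome_eq_alt (lst : List Int) (hpre : lst ≠ []) : drome lst = drome_alt lst := by
  unfold drome drome_alt
  rw [foldl_range_eq_go, dromeGo_eq]
  have hlast1 : PySem.List.pyGetD lst ((lst.length : Int) - 1) 0 = lst.getLast hpre := by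
    have hlen : 0 < lst.length := List.length_pos_iff.2 hpre
    rw [PySem.List.pyGetD_eq_getElem lst 0 (by omega) (by push_cast; omega)]
    rw [List.getLast_eq_getElem]
    congr 1
    omega
  have hlast2 : PySem.List.pyGetD lst (-1) 0 = lst.getLast hpre :=
    PySem.List.pyGetD_neg_one lst 0 hpre
  rw [hlast1, hlast2]
  have hnodup : lst.Nodup ↔ lst.dropLast.Nodup ∧ lst.getLast hpre ∉ lst.dropLast := by
    conv_lhs => rw [← List.dropLast_append_getLast hpre]
    rw [List.nodup_append]
    constructor
    · rintro ⟨h1, h2, h3⟩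
      exact ⟨h1, fun hc => h3 _ hc _ (by simp) rfl⟩
    · rintro ⟨h1, h2⟩
      refine ⟨h1, List.nodup_singleton _, ?_⟩
      intro a ha b hb
      rw [List.mem_singleton] at hb
      subst hb
      exact fun hc => absurd ha (hc ▸ h2)
  have hall : (lst.all (fun x => x == lst.getLast hpre)) =
      decide (List.IsChain (fun a b : Int => a = b) lst) := by
    rw [Bool.eq_iff_iff]
    simp only [List.all_eq_true, beq_iff_eq, decide_eq_true_eq]
    exact same_iff lst hpre
  have hasc : (lst == PySem.List.sorted lst (fun x => x) false) =
      decide (List.IsChain (fun a b : Int => a ≤ b) lst) := by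
    rw [Bool.eq_iff_iff]
    simp only [beq_iff_eq, decide_eq_true_eq]
    exact asc_iff lst
  have hdesc : (lst == PySem.List.sorted lst (fun x => x) true) =
      decide (List.IsChain (fun a b : Int => b ≤ a) lst) := by
    rw [Bool.eq_iff_iff]
    simp only [beq_iff_eq, decide_eq_true_eq]
    exact desc_iff lst
  have huniq : ((PySem.Set.ofList lst).length == lst.length) = decide lst.Nodup := by
    rw [Bool.eq_iff_iff]
    simp only [beq_iff_eq, decide_eq_true_eq]
    exact ofList_len_iff lst
  by_cases hS : List.IsChain (fun a b : Int => a = b) lst <;>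
  by_cases hA : List.IsChain (fun a b : Int => a ≤ b) lst <;>
  by_cases hD : List.IsChain (fun a b : Int => b ≤ a) lst <;>
  by_cases hND : lst.dropLast.Nodup <;>
  by_cases hM : lst.getLast hpre ∈ lst.dropLast <;>
  simp [hall, hasc, hdesc, huniq, hS, hA, hD, hND, hM, hnodup]

-- ===== VERDICT (by name: the statement is the Claim_ definition above) =====
theorem drome_spec : Claim_equal_drome := by
  intro lst _ hpre
  exact drome_eq_alt lst hpre
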